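-- pv_equiv track=rewrite | github.com/PhoenixWingsCode/DSA-using-Python | Graphs/Minimum Island/bfs.py | min_island
-- ===== SOURCE A (Python) =====
-- from collections import deque
--
-- def min_island(grid):
--     if not grid:
--         return 0
--
--     rows, cols = len(grid), len(grid[0])
--     visited = [[False for _ in range(cols)] for _ in range(rows)]
--     min_size = float('inf')
--
--     def bfs(r, c):
--         queue = deque([(r, c)])
--         visited[r][c] = True
--         size = 0
--
--         while queue:
--             row, col = queue.popleft()
--             size += 1
--
--             for dr, dc in [(-1, 0), (1, 0), (0, -1), (0, 1)]:
--                 nr, nc = row + dr, col + dc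
--                 if 0 <= nr < rows and 0 <= nc < cols and not visited[nr][nc] and grid[nr][nc] == '1':
--                     queue.append((nr, nc))
--                     visited[nr][nc] = True
--
--         return size
--
--     for r in range(rows):
--         for c in range(cols):
--             if grid[r][c] == '1' and not visited[r][c]:
--                 island_size = bfs(r, c)
--                 min_size = min(min_size, island_size)
--
--     return min_size if min_size != float('inf') else 0
-- ===== SOURCE B (Python) =====
-- def min_island(grid):
--     if not grid:
--         return 0
--
--     rows, cols = len(grid), len(grid[0])
--     visited = [[False] * cols for _ in range(rows)]
--
--     def dfs(r, c):
--         visited[r][c] = True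
--         size = 1
--         for dr, dc in ((-1, 0), (1, 0), (0, -1), (0, 1)):
--             nr, nc = r + dr, c + dc
--             if 0 <= nr < rows and 0 <= nc < cols and not visited[nr][nc] and grid[nr][nc] == '1':
--                 size += dfs(nr, nc)
--         return size
--
--     min_size = float('inf')
--     for r in range(rows):
--         for c in range(cols):
--             if grid[r][c] == '1' and not visited[r][c]:
--                 min_size = min(min_size, dfs(r, c))
--
--     return min_size if min_size != float('inf') else 0
-- ===== Notes on version B (the rewrite author's own statement) =====
-- stated objective: alternative
-- what changed: The iterative BFS flood fill with an explicit deque is replaced by a recursive DFS helper that marks a cell and returns 1 plus the sum of recursive calls on its unvisited '1' neighbours (iterative-queue to recursive decomposition); the outer scan and min tracking are unchanged.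
import Mathlib
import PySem

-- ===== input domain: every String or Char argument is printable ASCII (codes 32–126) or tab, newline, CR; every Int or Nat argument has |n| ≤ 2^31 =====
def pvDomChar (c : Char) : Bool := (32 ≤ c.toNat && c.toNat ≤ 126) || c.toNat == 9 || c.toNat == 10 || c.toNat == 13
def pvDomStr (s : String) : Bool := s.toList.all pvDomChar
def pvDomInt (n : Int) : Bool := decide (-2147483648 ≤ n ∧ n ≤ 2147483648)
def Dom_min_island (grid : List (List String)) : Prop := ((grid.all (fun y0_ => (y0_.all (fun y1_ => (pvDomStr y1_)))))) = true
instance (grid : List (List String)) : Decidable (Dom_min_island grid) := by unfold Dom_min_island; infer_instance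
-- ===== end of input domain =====

-- B replaces the iterative BFS (deque) flood fill by a recursive DFS helper; outer scan and min-tracking unchanged.

-- shared cell accessors (used by both ports; indices are bounds-checked before use)
def pvVal (grid : List (List String)) (r c : Int) : String :=
  (grid.getD r.toNat []).getD c.toNat ""

def pvDirs : List (Int × Int) := [(-1, 0), (1, 0), (0, -1), (0, 1)]

-- the in-bounds cells, the termination measure of both flood fills
def pvUniv (rows cols : Nat) : Finset (Int × Int) :=
  (Finset.range rows ×ˢ Finset.range cols).image (fun p => ((p.1 : Int), (p.2 : Int)))

-- the neighbours of rc that A enqueues: in bounds, unvisited, value "1"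
def pvNews (grid : List (List String)) (rows cols : Nat) (V : Finset (Int × Int)) (rc : Int × Int) :
    List (Int × Int) :=
  pvDirs.filterMap (fun d =>
    let nr := rc.1 + d.1
    let nc := rc.2 + d.2
    if 0 ≤ nr ∧ nr < (rows : Int) ∧ 0 ≤ nc ∧ nc < (cols : Int) ∧
        (nr, nc) ∉ V ∧ pvVal grid nr nc = "1" then some (nr, nc) else none)

theorem mem_pvUniv {rows cols : Nat} {p : Int × Int} :
    p ∈ pvUniv rows cols ↔ 0 ≤ p.1 ∧ p.1 < (rows : Int) ∧ 0 ≤ p.2 ∧ p.2 < (cols : Int) := by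
  simp only [pvUniv, Finset.mem_image, Finset.mem_product, Finset.mem_range]
  constructor
  · rintro ⟨⟨a, b⟩, ⟨ha, hb⟩, rfl⟩
    simp only []
    omega
  · rintro ⟨h1, h2, h3, h4⟩
    exact ⟨(p.1.toNat, p.2.toNat), ⟨by omega, by omega⟩, by
      cases p; simp only [Prod.mk.injEq]; omega⟩

theorem mem_pvNews {grid : List (List String)} {rows cols : Nat} {V : Finset (Int × Int)}
    {rc y : Int × Int} :
    y ∈ pvNews grid rows cols V rc ↔
      (∃ d ∈ pvDirs, y = (rc.1 + d.1, rc.2 + d.2)) ∧ 0 ≤ y.1 ∧ y.1 < (rows : Int) ∧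
        0 ≤ y.2 ∧ y.2 < (cols : Int) ∧ y ∉ V ∧ pvVal grid y.1 y.2 = "1" := by
  simp only [pvNews, List.mem_filterMap]
  constructor
  · rintro ⟨d, hd, hy⟩
    split at hy
    · rename_i hc
      cases hy
      exact ⟨⟨d, hd, rfl⟩, hc.1, hc.2.1, hc.2.2.1, hc.2.2.2.1, hc.2.2.2.2.1, hc.2.2.2.2.2⟩
    · cases hy
  · rintro ⟨⟨d, hd, rfl⟩, h⟩
    exact ⟨d, hd, by rw [if_pos h]⟩

-- termination helper: newly visited in-bounds cells shrink the unvisited part of pvUniv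
theorem pvUniv_sdiff_lt {rows cols : Nat} {V : Finset (Int × Int)} {x : Int × Int}
    (hx : x ∈ pvUniv rows cols) (hxV : x ∉ V) (W : Finset (Int × Int)) (hW : x ∈ W) :
    ((pvUniv rows cols) \ (V ∪ W)).card < ((pvUniv rows cols) \ V).card := by
  apply Finset.card_lt_card
  constructor
  · intro y hy
    simp only [Finset.mem_sdiff, Finset.mem_union] at hy ⊢
    exact ⟨hy.1, fun h => hy.2 (Or.inl h)⟩
  · intro hsub
    have := hsub (by simp [Finset.mem_sdiff, hx, hxV] : x ∈ (pvUniv rows cols) \ V)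
    simp [Finset.mem_sdiff, Finset.mem_union, hW] at this

theorem pvNews_measure (grid : List (List String)) (rows cols : Nat) (V : Finset (Int × Int))
    (rc : Int × Int) (q : List (Int × Int)) :
    Prod.Lex (· < ·) (· < ·)
      (((pvUniv rows cols) \ (V ∪ (pvNews grid rows cols V rc).toFinset)).card,
        (q ++ pvNews grid rows cols V rc).length)
      (((pvUniv rows cols) \ V).card, (rc :: q).length) := by
  rcases h : pvNews grid rows cols V rc with _ | ⟨y, t⟩
  · simp only [List.toFinset_nil, Finset.union_empty, List.append_nil, List.length_cons]
    exact Prod.Lex.right _ (by omega)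
  · apply Prod.Lex.left
    have hy : y ∈ pvNews grid rows cols V rc := by rw [h]; simp
    rw [mem_pvNews] at hy
    exact pvUniv_sdiff_lt (mem_pvUniv.2 ⟨hy.2.1, hy.2.2.1, hy.2.2.2.1, hy.2.2.2.2.1⟩)
      hy.2.2.2.2.2.1 _ (by simp)

-- ===== PORT A =====
-- A's BFS: pop the head, count it, append the unvisited in-bounds '1' neighbours and mark them
def bfsLoop (grid : List (List String)) (rows cols : Nat) :
    List (Int × Int) → Finset (Int × Int) → Int × Finset (Int × Int)
  | [], V => (0, V)
  | rc :: q, V =>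
      let news := pvNews grid rows cols V rc
      let p := bfsLoop grid rows cols (q ++ news) (V ∪ news.toFinset)
      (1 + p.1, p.2)
  termination_by q V => (((pvUniv rows cols) \ V).card, q.length)
  decreasing_by exact pvNews_measure grid rows cols V rc q

def min_island (grid : List (List String)) : Int :=
  if grid = [] then 0
  else
    let rows := grid.length
    let cols := (grid.getD 0 []).length
    let cells := (List.range rows).flatMap (fun r => (List.range cols).map (fun c => ((r : Int), (c : Int))))
    let res := cells.foldl
      (fun (st : Option Int × Finset (Int × Int)) rc =>
        if pvVal grid rc.1 rc.2 = "1" ∧ rc ∉ st.2 then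
          let p := bfsLoop grid rows cols [rc] (insert rc st.2)
          (some (match st.1 with | none => p.1 | some m => min m p.1), p.2)
        else st)
      (none, ∅)
    match res.1 with
    | none => 0
    | some m => m

-- ===== PORT B =====
-- B's DFS: mark the cell, then recurse on each in-bounds unvisited '1' neighbour in order.
-- The fuel argument only makes the recursion structural; rows*cols+1 is always enough (proved below).
mutual
def dfsGo (grid : List (List String)) (rows cols : Nat) :
    Nat → (Int × Int) → Finset (Int × Int) → Int × Finset (Int × Int)
  | 0, _, V => (0, V)
  | f + 1, rc, V => dfsFold grid rows cols f pvDirs rc (1, insert rc V)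
  termination_by f _ _ => (f, 0)

def dfsFold (grid : List (List String)) (rows cols : Nat) :
    Nat → List (Int × Int) → (Int × Int) → Int × Finset (Int × Int) → Int × Finset (Int × Int)
  | _, [], _, st => st
  | f, d :: ds, rc, (s, V) =>
      let nr := rc.1 + d.1
      let nc := rc.2 + d.2
      if 0 ≤ nr ∧ nr < (rows : Int) ∧ 0 ≤ nc ∧ nc < (cols : Int) ∧
          (nr, nc) ∉ V ∧ pvVal grid nr nc = "1" then
        let p := dfsGo grid rows cols f (nr, nc) V
        dfsFold grid rows cols f ds rc (s + p.1, p.2)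
      else dfsFold grid rows cols f ds rc (s, V)
  termination_by f ds _ _ => (f, ds.length + 1)
end

def min_island_alt (grid : List (List String)) : Int :=
  if grid = [] then 0
  else
    let rows := grid.length
    let cols := (grid.getD 0 []).length
    let cells := (List.range rows).flatMap (fun r => (List.range cols).map (fun c => ((r : Int), (c : Int))))
    let res := cells.foldl
      (fun (st : Option Int × Finset (Int × Int)) rc =>
        if pvVal grid rc.1 rc.2 = "1" ∧ rc ∉ st.2 then
          let p := dfsGo grid rows cols (rows * cols + 1) rc st.2
          (some (match st.1 with | none => p.1 | some m => min m p.1), p.2)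
        else st)
      (none, ∅)
    match res.1 with
    | none => 0
    | some m => m

-- ===== PRECONDITION & SPEC =====
-- Pre_ excludes exactly the ragged grids on which the Python A raises IndexError
-- (some row shorter than the first row); B raises there too.
def Pre_min_island (grid : List (List String)) : Prop :=
  ∀ row ∈ grid, (grid.getD 0 []).length ≤ row.length
instance (grid : List (List String)) : Decidable (Pre_min_island grid) := by
  unfold Pre_min_island; infer_instance

def pvWitness_min_island : List (List String) := [["1", "0"], ["0", "1"]]

def Spec_min_island (grid : List (List String)) (out : Int) : Prop := out = min_island_alt grid
instance (grid : List (List String)) (out : Int) : Decidable (Spec_min_island grid out) := by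
  unfold Spec_min_island; infer_instance

-- ===== CLAIM (what is proved, stated in full; the proofs are below) =====
def Claim_equal_min_island : Prop := ∀ (grid : List (List String)), Dom_min_island grid → Pre_min_island grid → Spec_min_island grid (min_island grid)

-- ===== LEMMAS AND PROOFS =====

-- ---------- abstract flood-fill reachability (order independence) ----------
-- RRel g adj A: one step into a good, not-yet-avoided cell
def RRel {α : Type} (g : α → Prop) (adj : α → α → Prop) (A : Set α) (a b : α) : Prop :=
  g b ∧ b ∉ A ∧ adj a b

-- RSet g adj A S: everything reachable from a valid seed in S through good cells outside A
def RSet {α : Type} (g : α → Prop) (adj : α → α → Prop) (A S : Set α) : Set α :=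
  {c | ∃ s ∈ S, g s ∧ s ∉ A ∧ Relation.ReflTransGen (RRel g adj A) s c}

theorem RSet_prop {α : Type} {g : α → Prop} {adj : α → α → Prop} {A S : Set α} {c : α}
    (h : c ∈ RSet g adj A S) : g c ∧ c ∉ A := by
  obtain ⟨s, _, hs, hsA, hp⟩ := h
  induction hp with
  | refl => exact ⟨hs, hsA⟩
  | tail _ hrel _ => exact ⟨hrel.1, hrel.2.1⟩

theorem RSet_closed {α : Type} {g : α → Prop} {adj : α → α → Prop} {A S : Set α} {c d : α}
    (h : c ∈ RSet g adj A S) (hcd : RRel g adj A c d) : d ∈ RSet g adj A S := by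
  obtain ⟨s, hS, hs, hsA, hp⟩ := h
  exact ⟨s, hS, hs, hsA, hp.tail hcd⟩

theorem RSet_seed {α : Type} {g : α → Prop} {adj : α → α → Prop} {A S : Set α} {s : α}
    (hS : s ∈ S) (hg : g s) (hA : s ∉ A) : s ∈ RSet g adj A S :=
  ⟨s, hS, hg, hA, Relation.ReflTransGen.refl⟩

theorem RSet_mono_seeds {α : Type} {g : α → Prop} {adj : α → α → Prop} {A S T : Set α}
    (hST : S ⊆ T) : RSet g adj A S ⊆ RSet g adj A T := by
  rintro c ⟨s, hS, hs, hsA, hp⟩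
  exact ⟨s, hST hS, hs, hsA, hp⟩

theorem RSet_mono_avoid {α : Type} {g : α → Prop} {adj : α → α → Prop} {A A' S : Set α}
    (hAA : A ⊆ A') : RSet g adj A' S ⊆ RSet g adj A S := by
  rintro c ⟨s, hS, hs, hsA, hp⟩
  refine ⟨s, hS, hs, fun h => hsA (hAA h), hp.mono ?_⟩
  rintro a b ⟨h1, h2, h3⟩
  exact ⟨h1, fun h => h2 (hAA h), h3⟩

theorem RSet_empty {α : Type} {g : α → Prop} {adj : α → α → Prop} {A : Set α} :
    RSet g adj A (∅ : Set α) = ∅ := by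
  ext c; simp [RSet]

theorem RSet_seed_invalid {α : Type} {g : α → Prop} {adj : α → α → Prop} {A T : Set α} {s : α}
    (h : ¬ (g s ∧ s ∉ A)) : RSet g adj A ({s} ∪ T) = RSet g adj A T := by
  ext c
  constructor
  · rintro ⟨t, ht, hgt, htA, hp⟩
    rcases ht with ht | ht
    · cases ht; exact absurd ⟨hgt, htA⟩ h
    · exact ⟨t, ht, hgt, htA, hp⟩
  · exact fun hc => RSet_mono_seeds (Set.subset_union_right) hc

-- processing the seeds S first then T: the avoided part grows by everything S reached
theorem RSet_split {α : Type} (g : α → Prop) (adj : α → α → Prop) (A S T : Set α) :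
    RSet g adj A (S ∪ T) = RSet g adj A S ∪ RSet g adj (A ∪ RSet g adj A S) T := by
  ext c
  constructor
  · rintro ⟨s, hsST, hgs, hsA, hp⟩
    rcases hsST with hsS | hsT
    · exact Or.inl ⟨s, hsS, hgs, hsA, hp⟩
    · induction hp with
      | refl =>
        by_cases hs : s ∈ RSet g adj A S
        · exact Or.inl hs
        · exact Or.inr ⟨s, hsT, hgs, by simp [hsA, hs], Relation.ReflTransGen.refl⟩
      | tail hp' hrel ih =>
        rcases ih with hb | hb
        · exact Or.inl (RSet_closed hb hrel)
        · rename_i b c'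
          by_cases hc : c' ∈ RSet g adj A S
          · exact Or.inl hc
          · exact Or.inr (RSet_closed hb ⟨hrel.1, by simp [hrel.2.1, hc], hrel.2.2⟩)
  · rintro (hc | hc)
    · exact RSet_mono_seeds Set.subset_union_left hc
    · exact RSet_mono_seeds Set.subset_union_right (RSet_mono_avoid Set.subset_union_left hc)

-- processing a single fresh good seed: itself plus everything its neighbours reach without it
theorem RSet_step {α : Type} (g : α → Prop) (adj : α → α → Prop) (A Q : Set α) (x : α)
    (hg : g x) (hxA : x ∉ A) :
    RSet g adj A ({x} ∪ Q) = {x} ∪ RSet g adj (A ∪ {x}) ({b | adj x b} ∪ Q) := by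
  ext c
  constructor
  · rintro ⟨s, hsxQ, hgs, hsA, hp⟩
    induction hp with
    | refl =>
      rcases hsxQ with hs | hs
      · exact Or.inl hs
      · by_cases hsx : s = x
        · exact Or.inl (by simp [hsx])
        · exact Or.inr ⟨s, Or.inr hs, hgs, by simp [hsA, hsx], Relation.ReflTransGen.refl⟩
    | tail hp' hrel ih =>
      rename_i b c'
      by_cases hcx : c' = x
      · exact Or.inl (by simp [hcx])
      · rcases ih with hb | hb
        · have hbx : b = x := hb
          refine Or.inr ⟨c', Or.inl ?_, hrel.1, by simp [hrel.2.1, hcx], Relation.ReflTransGen.refl⟩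
          show adj x c'
          rw [← hbx]; exact hrel.2.2
        · exact Or.inr (RSet_closed hb ⟨hrel.1, by simp [hrel.2.1, hcx], hrel.2.2⟩)
  · rintro (hc | hc)
    · have hcx : c = x := hc
      exact ⟨x, Or.inl rfl, hg, hxA, by rw [hcx]⟩
    · obtain ⟨s, hsNQ, hgs, hsA', hp⟩ := hc
      have hsA : s ∉ A := fun h => hsA' (Or.inl h)
      have hp' : Relation.ReflTransGen (RRel g adj A) s c := by
        refine hp.mono ?_
        rintro a b ⟨h1, h2, h3⟩
        exact ⟨h1, fun h => h2 (Or.inl h), h3⟩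
      rcases hsNQ with hs | hs
      · exact ⟨x, Or.inl rfl, hg, hxA,
          Relation.ReflTransGen.head ⟨hgs, hsA, hs⟩ hp'⟩
      · exact ⟨s, Or.inr hs, hgs, hsA, hp'⟩

theorem RSet_finite {α : Type} {g : α → Prop} {adj : α → α → Prop} {A S : Set α}
    (U : Finset α) (hU : ∀ y, g y → y ∈ U) : (RSet g adj A S).Finite :=
  Set.Finite.subset U.finite_toSet (fun c hc => hU c (RSet_prop hc).1)

theorem RSet_split_ncard {α : Type} (g : α → Prop) (adj : α → α → Prop) (A S T : Set α)
    (U : Finset α) (hU : ∀ y, g y → y ∈ U) :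
    (RSet g adj A (S ∪ T)).ncard
      = (RSet g adj A S).ncard + (RSet g adj (A ∪ RSet g adj A S) T).ncard := by
  rw [RSet_split g adj A S T]
  refine Set.ncard_union_eq ?_ (RSet_finite U hU) (RSet_finite U hU)
  rw [Set.disjoint_left]
  intro c hc hcT
  exact (RSet_prop hcT).2 (Or.inr hc)

theorem RSet_step_ncard {α : Type} (g : α → Prop) (adj : α → α → Prop) (A Q : Set α) (x : α)
    (hg : g x) (hxA : x ∉ A) (U : Finset α) (hU : ∀ y, g y → y ∈ U) :
    (RSet g adj A ({x} ∪ Q)).ncard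
      = 1 + (RSet g adj (A ∪ {x}) ({b | adj x b} ∪ Q)).ncard := by
  have hfin : (RSet g adj (A ∪ {x}) ({b | adj x b} ∪ Q)).Finite := RSet_finite U hU
  have hx' : x ∉ RSet g adj (A ∪ {x}) ({b | adj x b} ∪ Q) :=
    fun h => (RSet_prop h).2 (Or.inr rfl)
  rw [RSet_step g adj A Q x hg hxA, Set.singleton_union,
    Set.ncard_insert_of_notMem hx' hfin]
  omega

-- ---------- instantiation on the grid ----------
def pvGood (grid : List (List String)) (rows cols : Nat) (p : Int × Int) : Prop :=
  0 ≤ p.1 ∧ p.1 < (rows : Int) ∧ 0 ≤ p.2 ∧ p.2 < (cols : Int) ∧ pvVal grid p.1 p.2 = "1"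

def pvAdj (a b : Int × Int) : Prop := ∃ d ∈ pvDirs, b = (a.1 + d.1, a.2 + d.2)

def pvR (grid : List (List String)) (rows cols : Nat) (A S : Set (Int × Int)) : Set (Int × Int) :=
  RSet (pvGood grid rows cols) pvAdj A S

theorem pvGood_mem_univ {grid : List (List String)} {rows cols : Nat} {p : Int × Int}
    (h : pvGood grid rows cols p) : p ∈ pvUniv rows cols :=
  mem_pvUniv.2 ⟨h.1, h.2.1, h.2.2.1, h.2.2.2.1⟩

theorem pvNews_nodup {grid : List (List String)} {rows cols : Nat} {V : Finset (Int × Int)}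
    {rc : Int × Int} : (pvNews grid rows cols V rc).Nodup := by
  unfold pvNews
  refine List.Nodup.filterMap ?_ (by decide)
  rintro ⟨a1, a2⟩ ⟨b1, b2⟩ c hc hc'
  simp only [Option.mem_def] at hc hc'
  split at hc
  · split at hc'
    · injection hc with h1
      injection hc' with h2
      rw [← h2] at h1
      rw [Prod.mk.injEq] at h1 ⊢
      constructor <;> omega
    · exact absurd hc' (by simp)
  · exact absurd hc (by simp)

-- ---------- BFS meets the reachability spec ----------
theorem bfsLoop_spec (grid : List (List String)) (rows cols : Nat) :
    ∀ (q : List (Int × Int)) (V : Finset (Int × Int)),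
      (∀ x ∈ q, pvGood grid rows cols x) → (∀ x ∈ q, x ∈ V) → q.Nodup →
      (bfsLoop grid rows cols q V).1
          = ((pvR grid rows cols ((V : Set (Int × Int)) \ {y | y ∈ q}) {y | y ∈ q}).ncard : Int)
        ∧ ((bfsLoop grid rows cols q V).2 : Set (Int × Int))
          = (V : Set (Int × Int)) ∪ pvR grid rows cols ((V : Set (Int × Int)) \ {y | y ∈ q}) {y | y ∈ q} := by
  intro q V
  refine bfsLoop.induct grid rows cols
    (fun q V => (∀ x ∈ q, pvGood grid rows cols x) → (∀ x ∈ q, x ∈ V) → q.Nodup →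
      (bfsLoop grid rows cols q V).1
          = ((pvR grid rows cols ((V : Set (Int × Int)) \ {y | y ∈ q}) {y | y ∈ q}).ncard : Int)
        ∧ ((bfsLoop grid rows cols q V).2 : Set (Int × Int))
          = (V : Set (Int × Int)) ∪ pvR grid rows cols ((V : Set (Int × Int)) \ {y | y ∈ q}) {y | y ∈ q})
    ?_ ?_ q V
  · intro V _ _ _
    constructor
    · show (bfsLoop grid rows cols [] V).1 = _
      simp [bfsLoop, pvR, RSet_empty]
    · show ((bfsLoop grid rows cols [] V).2 : Set (Int × Int)) = _
      simp [bfsLoop, pvR, RSet_empty]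
  · intro rc q V news ih hg hv nd
    have hnews : news = pvNews grid rows cols V rc := rfl
    clear_value news
    subst hnews
    -- basic facts about the head, the tail and the new neighbours
    have hgrc : pvGood grid rows cols rc := hg rc List.mem_cons_self
    have hvrc : rc ∈ V := hv rc List.mem_cons_self
    obtain ⟨hrcq, ndq⟩ := List.nodup_cons.mp nd
    have hNgood : ∀ y ∈ pvNews grid rows cols V rc, pvGood grid rows cols y := by
      intro y hy
      obtain ⟨_, h⟩ := mem_pvNews.mp hy
      exact ⟨h.1, h.2.1, h.2.2.1, h.2.2.2.1, h.2.2.2.2.2⟩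
    have hNnotV : ∀ y ∈ pvNews grid rows cols V rc, y ∉ V := by
      intro y hy
      exact (mem_pvNews.mp hy).2.2.2.2.2.1
    have hNadj : ∀ y ∈ pvNews grid rows cols V rc, pvAdj rc y := by
      intro y hy
      obtain ⟨⟨d, hd, hyd⟩, _⟩ := mem_pvNews.mp hy
      exact ⟨d, hd, hyd⟩
    -- the invariants carry over to the extended queue
    have h1 : ∀ x ∈ q ++ pvNews grid rows cols V rc, pvGood grid rows cols x := by
      intro x hx
      rcases List.mem_append.mp hx with hx | hx
      · exact hg x (List.mem_cons_of_mem _ hx)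
      · exact hNgood x hx
    have h2 : ∀ x ∈ q ++ pvNews grid rows cols V rc, x ∈ V ∪ (pvNews grid rows cols V rc).toFinset := by
      intro x hx
      rcases List.mem_append.mp hx with hx | hx
      · exact Finset.mem_union_left _ (hv x (List.mem_cons_of_mem _ hx))
      · exact Finset.mem_union_right _ (List.mem_toFinset.mpr hx)
    have h3 : (q ++ pvNews grid rows cols V rc).Nodup := by
      rw [List.nodup_append]
      refine ⟨ndq, pvNews_nodup, ?_⟩
      intro x hxq y hyn hxy
      exact hNnotV y hyn (hxy ▸ hv x (List.mem_cons_of_mem _ hxq))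
    obtain ⟨k1, k2⟩ := ih h1 h2 h3
    -- the step and exchange identities
    have hA : ((V : Set (Int × Int)) \ {y | y ∈ rc :: q}) ∪ {rc} = (V : Set (Int × Int)) \ {y | y ∈ q} := by
      ext z
      simp only [Set.mem_union, Set.mem_diff, Set.mem_setOf_eq, List.mem_cons, Set.mem_singleton_iff]
      constructor
      · rintro (⟨hzV, hz⟩ | rfl)
        · exact ⟨hzV, fun h => hz (Or.inr h)⟩
        · exact ⟨by simpa using hvrc, hrcq⟩
      · rintro ⟨hzV, hzq⟩
        by_cases hzrc : z = rc
        · exact Or.inr hzrc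
        · exact Or.inl ⟨hzV, by tauto⟩
      -- the valid seeds among rc's four neighbours are exactly the enqueued ones
    have hE3 : pvR grid rows cols ((V : Set (Int × Int)) \ {y | y ∈ q}) ({b | pvAdj rc b} ∪ {y | y ∈ q})
        = pvR grid rows cols ((V : Set (Int × Int)) \ {y | y ∈ q}) ({y | y ∈ pvNews grid rows cols V rc} ∪ {y | y ∈ q}) := by
      ext c
      constructor
      · rintro ⟨s, hsNQ, hgs, hsA, hp⟩
        rcases hsNQ with hs | hs
        · by_cases hsV : s ∈ V
          · have hsq : s ∈ {y : Int × Int | y ∈ q} := by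
              by_contra hsq
              exact hsA ⟨by simpa using hsV, hsq⟩
            exact ⟨s, Or.inr hsq, hgs, hsA, hp⟩
          · have hsn : s ∈ pvNews grid rows cols V rc := by
              obtain ⟨d, hd, hsd⟩ := hs
              exact mem_pvNews.mpr ⟨⟨d, hd, hsd⟩, hgs.1, hgs.2.1, hgs.2.2.1, hgs.2.2.2.1, hsV,
                hgs.2.2.2.2⟩
            exact ⟨s, Or.inl hsn, hgs, hsA, hp⟩
        · exact ⟨s, Or.inr hs, hgs, hsA, hp⟩
      · rintro ⟨s, hsNQ, hgs, hsA, hp⟩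
        rcases hsNQ with hs | hs
        · exact ⟨s, Or.inl (hNadj s hs), hgs, hsA, hp⟩
        · exact ⟨s, Or.inr hs, hgs, hsA, hp⟩
    unfold pvR at hE3
    -- the avoided set and seed set of the recursive call, rewritten
    have hE1 : ((V ∪ (pvNews grid rows cols V rc).toFinset : Finset (Int × Int)) : Set (Int × Int))
          \ {y | y ∈ q ++ pvNews grid rows cols V rc}
        = (V : Set (Int × Int)) \ {y | y ∈ q} := by
      ext z
      simp only [Finset.coe_union, Set.mem_diff, Set.mem_union, Finset.mem_coe,
        List.coe_toFinset, Set.mem_setOf_eq, List.mem_append]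
      constructor
      · rintro ⟨hzm, hz⟩
        rcases hzm with hzV | hzn
        · exact ⟨hzV, fun h => hz (Or.inl h)⟩
        · exact absurd (Or.inr hzn) hz
      · rintro ⟨hzV, hzq⟩
        exact ⟨Or.inl hzV, fun h => by
          rcases h with h | h
          · exact hzq h
          · exact hNnotV z h hzV⟩
    have hE2 : {y : Int × Int | y ∈ q ++ pvNews grid rows cols V rc}
        = {y | y ∈ pvNews grid rows cols V rc} ∪ {y | y ∈ q} := by
      ext z
      simp only [Set.mem_setOf_eq, List.mem_append, Set.mem_union]
      tauto
    rw [hE1, hE2] at k1 k2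
    have hseeds : {y : Int × Int | y ∈ rc :: q} = {rc} ∪ {y | y ∈ q} := by
      ext z
      simp [List.mem_cons]
    have hrcA : rc ∉ (V : Set (Int × Int)) \ {y | y ∈ rc :: q} := by
      rintro ⟨_, h⟩
      exact h List.mem_cons_self
    have hstep := RSet_step (pvGood grid rows cols) pvAdj
      ((V : Set (Int × Int)) \ {y | y ∈ rc :: q}) {y | y ∈ q} rc hgrc hrcA
    have hcount := RSet_step_ncard (pvGood grid rows cols) pvAdj
      ((V : Set (Int × Int)) \ {y | y ∈ rc :: q}) {y | y ∈ q} rc hgrc hrcA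
      (pvUniv rows cols) (fun y hy => pvGood_mem_univ hy)
    rw [hA] at hstep hcount
    rw [hseeds] at hstep hcount
    have heq : bfsLoop grid rows cols (rc :: q) V
        = (1 + (bfsLoop grid rows cols (q ++ pvNews grid rows cols V rc)
              (V ∪ (pvNews grid rows cols V rc).toFinset)).1,
           (bfsLoop grid rows cols (q ++ pvNews grid rows cols V rc)
              (V ∪ (pvNews grid rows cols V rc).toFinset)).2) := by
      simp [bfsLoop]
    constructor
    · rw [heq]
      show 1 + _ = _
      rw [k1, hseeds]
      unfold pvR
      rw [hcount, hE3]
      push_cast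
      ring
    · rw [heq]
      show ((bfsLoop grid rows cols (q ++ pvNews grid rows cols V rc)
              (V ∪ (pvNews grid rows cols V rc).toFinset)).2 : Set (Int × Int)) = _
      rw [k2, hseeds]
      unfold pvR
      rw [hstep, hE3]
      have hNsub : {y : Int × Int | y ∈ pvNews grid rows cols V rc}
          ⊆ RSet (pvGood grid rows cols) pvAdj ((V : Set (Int × Int)) \ {y | y ∈ q})
              ({y | y ∈ pvNews grid rows cols V rc} ∪ {y | y ∈ q}) := by
        intro z hz
        exact RSet_seed (Or.inl hz) (hNgood z hz) (fun h => hNnotV z hz (by simpa using h.1))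
      ext z
      simp only [Finset.coe_union, Set.mem_union, Finset.mem_coe, List.coe_toFinset,
        Set.mem_setOf_eq, Set.mem_singleton_iff]
      constructor
      · rintro ((hzV | hzn) | hzR)
        · exact Or.inl hzV
        · exact Or.inr (Or.inr (hNsub hzn))
        · exact Or.inr (Or.inr hzR)
      · rintro (hzV | (rfl | hzR))
        · exact Or.inl (Or.inl hzV)
        · exact Or.inl (Or.inl (by simpa using hvrc))
        · exact Or.inr hzR

-- ---------- DFS meets the reachability spec ----------
-- the cells offered by the remaining direction list
def pvT (rc : Int × Int) (ds : List (Int × Int)) : Set (Int × Int) :=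
  {b | ∃ d ∈ ds, b = (rc.1 + d.1, rc.2 + d.2)}

theorem pvT_cons {rc d : Int × Int} {ds : List (Int × Int)} :
    pvT rc (d :: ds) = {(rc.1 + d.1, rc.2 + d.2)} ∪ pvT rc ds := by
  ext b; simp [pvT, List.mem_cons, or_and_right, exists_or]

theorem pvT_nil {rc : Int × Int} : pvT rc [] = ∅ := by
  ext b; simp [pvT]

theorem pvT_dirs {rc : Int × Int} : pvT rc pvDirs = {b | pvAdj rc b} := rfl

theorem dfsGo_spec (grid : List (List String)) (rows cols : Nat) :
    ∀ (f : Nat) (x : Int × Int) (V : Finset (Int × Int)),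
      pvGood grid rows cols x → x ∉ V → ((pvUniv rows cols) \ V).card < f →
      (dfsGo grid rows cols f x V).1
          = ((pvR grid rows cols (V : Set (Int × Int)) {x}).ncard : Int)
        ∧ ((dfsGo grid rows cols f x V).2 : Set (Int × Int))
          = (V : Set (Int × Int)) ∪ pvR grid rows cols (V : Set (Int × Int)) {x} := by
  intro f x V
  refine dfsGo.induct grid rows cols
    (fun f x V => pvGood grid rows cols x → x ∉ V → ((pvUniv rows cols) \ V).card < f →
      (dfsGo grid rows cols f x V).1
          = ((pvR grid rows cols (V : Set (Int × Int)) {x}).ncard : Int)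
        ∧ ((dfsGo grid rows cols f x V).2 : Set (Int × Int))
          = (V : Set (Int × Int)) ∪ pvR grid rows cols (V : Set (Int × Int)) {x})
    (fun f ds rc st => ((pvUniv rows cols) \ st.2).card < f →
      (dfsFold grid rows cols f ds rc st).1
          = st.1 + ((pvR grid rows cols (st.2 : Set (Int × Int)) (pvT rc ds)).ncard : Int)
        ∧ ((dfsFold grid rows cols f ds rc st).2 : Set (Int × Int))
          = (st.2 : Set (Int × Int)) ∪ pvR grid rows cols (st.2 : Set (Int × Int)) (pvT rc ds))
    ?_ ?_ ?_ ?_ ?_ f x V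
  · -- fuel 0: hypothesis card < 0 is impossible
    intro x V _ _ hc
    exact absurd hc (Nat.not_lt_zero _)
  · -- dfsGo (f+1): mark x, then fold over the four directions
    intro f rc V ih hg hx hc
    have hU : rc ∈ pvUniv rows cols := pvGood_mem_univ hg
    have hss : (pvUniv rows cols) \ insert rc V ⊂ (pvUniv rows cols) \ V := by
      constructor
      · intro z hz
        simp only [Finset.mem_sdiff, Finset.mem_insert] at hz ⊢
        exact ⟨hz.1, fun h => hz.2 (Or.inr h)⟩
      · intro hsub
        have := hsub (show rc ∈ (pvUniv rows cols) \ V by simp [Finset.mem_sdiff, hU, hx])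
        simp [Finset.mem_sdiff] at this
    have hc2 : ((pvUniv rows cols) \ insert rc V).card < f := by
      have := Finset.card_lt_card hss
      omega
    obtain ⟨h1, h2⟩ := ih hc2
    have hxV : rc ∉ (V : Set (Int × Int)) := by simpa using hx
    have hstep := RSet_step (pvGood grid rows cols) pvAdj (V : Set (Int × Int)) ∅ rc hg hxV
    have hcount := RSet_step_ncard (pvGood grid rows cols) pvAdj (V : Set (Int × Int)) ∅ rc hg hxV
      (pvUniv rows cols) (fun y hy => pvGood_mem_univ hy)
    simp only [Set.union_empty] at hstep hcount
    have hins : ((insert rc V : Finset (Int × Int)) : Set (Int × Int))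
        = (V : Set (Int × Int)) ∪ {rc} := by
      rw [Finset.coe_insert, Set.union_singleton]
    have hgo : dfsGo grid rows cols (f + 1) rc V
        = dfsFold grid rows cols f pvDirs rc (1, insert rc V) := by
      simp [dfsGo]
    constructor
    · rw [hgo, h1]
      unfold pvR
      rw [hcount, hins, pvT_dirs]
      push_cast
      ring
    · rw [hgo, h2]
      unfold pvR
      rw [hstep, pvT_dirs]
      ext z
      simp only [Finset.coe_insert, Set.union_singleton, Set.mem_union, Set.mem_insert_iff,
        Set.mem_singleton_iff]
      tauto
  · -- dfsFold []: nothing left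
    intro f rc st _
    constructor
    · show (dfsFold grid rows cols f [] rc st).1 = _
      simp [dfsFold, pvT_nil, pvR, RSet_empty]
    · show ((dfsFold grid rows cols f [] rc st).2 : Set (Int × Int)) = _
      simp [dfsFold, pvT_nil, pvR, RSet_empty]
  · -- dfsFold, neighbour taken
    intro f d ds rc s V nr nc hcond hp ih1 _ ih2 hc
    have hnr : nr = rc.1 + d.1 := rfl
    have hnc : nc = rc.2 + d.2 := rfl
    have hpd : hp = dfsGo grid rows cols f (rc.1 + d.1, rc.2 + d.2) V := rfl
    clear_value hp
    rw [hnr, hnc] at hcond ih1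
    rw [hpd] at ih2
    have hc : ((pvUniv rows cols) \ V).card < f := hc
    have ih2 := fun h => ih2 (show ((pvUniv rows cols) \ _).card < f from h)
    have hgn : pvGood grid rows cols (rc.1 + d.1, rc.2 + d.2) :=
      ⟨hcond.1, hcond.2.1, hcond.2.2.1, hcond.2.2.2.1, hcond.2.2.2.2.2⟩
    have hnV : (rc.1 + d.1, rc.2 + d.2) ∉ V := hcond.2.2.2.2.1
    obtain ⟨h1, h2⟩ := ih1 hgn hnV hc
    have hnR : (rc.1 + d.1, rc.2 + d.2)
        ∈ pvR grid rows cols (V : Set (Int × Int)) {(rc.1 + d.1, rc.2 + d.2)} :=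
      RSet_seed rfl hgn (by simpa using hnV)
    have hnp : (rc.1 + d.1, rc.2 + d.2) ∈ (dfsGo grid rows cols f (rc.1 + d.1, rc.2 + d.2) V).2 := by
      have : (rc.1 + d.1, rc.2 + d.2)
          ∈ ((dfsGo grid rows cols f (rc.1 + d.1, rc.2 + d.2) V).2 : Set (Int × Int)) := by
        rw [h2]; exact Or.inr hnR
      simpa using this
    have hVp : V ⊆ (dfsGo grid rows cols f (rc.1 + d.1, rc.2 + d.2) V).2 := by
      intro z hz
      have : z ∈ ((dfsGo grid rows cols f (rc.1 + d.1, rc.2 + d.2) V).2 : Set (Int × Int)) := by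
        rw [h2]; exact Or.inl (by simpa using hz)
      simpa using this
    have hss : (pvUniv rows cols) \ (dfsGo grid rows cols f (rc.1 + d.1, rc.2 + d.2) V).2
        ⊂ (pvUniv rows cols) \ V := by
      constructor
      · intro z hz
        simp only [Finset.mem_sdiff] at hz ⊢
        exact ⟨hz.1, fun h => hz.2 (hVp h)⟩
      · intro hsub
        have := hsub (show (rc.1 + d.1, rc.2 + d.2) ∈ (pvUniv rows cols) \ V by
          simp [Finset.mem_sdiff, pvGood_mem_univ hgn, hnV])
        simp [Finset.mem_sdiff, hnp] at this
    have hc2 : ((pvUniv rows cols) \ (dfsGo grid rows cols f (rc.1 + d.1, rc.2 + d.2) V).2).card < f := by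
      have := Finset.card_lt_card hss
      omega
    obtain ⟨k1, k2⟩ := ih2 hc2
    have heq : dfsFold grid rows cols f (d :: ds) rc (s, V)
        = dfsFold grid rows cols f ds rc
            (s + (dfsGo grid rows cols f (rc.1 + d.1, rc.2 + d.2) V).1,
             (dfsGo grid rows cols f (rc.1 + d.1, rc.2 + d.2) V).2) := by
      simp only [dfsFold]
      rw [if_pos hcond]
    have hsplit := RSet_split (pvGood grid rows cols) pvAdj (V : Set (Int × Int))
      {(rc.1 + d.1, rc.2 + d.2)} (pvT rc ds)
    have hscount := RSet_split_ncard (pvGood grid rows cols) pvAdj (V : Set (Int × Int))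
      {(rc.1 + d.1, rc.2 + d.2)} (pvT rc ds) (pvUniv rows cols) (fun y hy => pvGood_mem_univ hy)
    have hp2 : ((dfsGo grid rows cols f (rc.1 + d.1, rc.2 + d.2) V).2 : Set (Int × Int))
        = (V : Set (Int × Int))
            ∪ RSet (pvGood grid rows cols) pvAdj (V : Set (Int × Int)) {(rc.1 + d.1, rc.2 + d.2)} := h2
    constructor
    · rw [heq, k1, h1, pvT_cons]
      unfold pvR
      rw [hscount, ← hp2]
      push_cast
      ring
    · rw [heq, k2, pvT_cons]
      unfold pvR
      rw [hsplit, hp2, Set.union_assoc]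
  · -- dfsFold, neighbour skipped
    intro f d ds rc s V nr nc hncond ih hc
    have hnr : nr = rc.1 + d.1 := rfl
    have hnc : nc = rc.2 + d.2 := rfl
    rw [hnr, hnc] at hncond
    have heq : dfsFold grid rows cols f (d :: ds) rc (s, V)
        = dfsFold grid rows cols f ds rc (s, V) := by
      simp only [dfsFold]
      rw [if_neg hncond]
    have hinv : ¬ (pvGood grid rows cols (rc.1 + d.1, rc.2 + d.2)
        ∧ (rc.1 + d.1, rc.2 + d.2) ∉ (V : Set (Int × Int))) := by
      rintro ⟨hgn, hnV⟩
      exact hncond ⟨hgn.1, hgn.2.1, hgn.2.2.1, hgn.2.2.2.1, by simpa using hnV, hgn.2.2.2.2⟩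
    have hseed := RSet_seed_invalid (g := pvGood grid rows cols) (adj := pvAdj)
      (A := (V : Set (Int × Int))) (T := pvT rc ds) hinv
    obtain ⟨k1, k2⟩ := ih hc
    constructor
    · rw [heq, k1, pvT_cons]
      unfold pvR
      rw [hseed]
    · rw [heq, k2, pvT_cons]
      unfold pvR
      rw [hseed]

-- ---------- the two flood fills agree call by call ----------
theorem fill_agree (grid : List (List String)) (rows cols : Nat)
    (rc : Int × Int) (V : Finset (Int × Int))
    (hg : pvGood grid rows cols rc) (hrc : rc ∉ V) :
    bfsLoop grid rows cols [rc] (insert rc V) = dfsGo grid rows cols (rows * cols + 1) rc V := by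
  have hbfs := bfsLoop_spec grid rows cols [rc] (insert rc V)
    (by simpa using hg) (by simp) (by simp)
  have hcard : ((pvUniv rows cols) \ V).card < rows * cols + 1 := by
    have h1 : ((pvUniv rows cols) \ V).card ≤ (pvUniv rows cols).card :=
      Finset.card_le_card Finset.sdiff_subset
    have h2 : (pvUniv rows cols).card ≤ rows * cols := by
      unfold pvUniv
      calc ((Finset.range rows ×ˢ Finset.range cols).image
              (fun p => ((p.1 : Int), (p.2 : Int)))).card
          ≤ (Finset.range rows ×ˢ Finset.range cols).card := Finset.card_image_le
        _ = rows * cols := by rw [Finset.card_product, Finset.card_range, Finset.card_range]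
    omega
  have hdfs := dfsGo_spec grid rows cols (rows * cols + 1) rc V hg hrc hcard
  have hs1 : {y : Int × Int | y ∈ [rc]} = ({rc} : Set (Int × Int)) := by ext z; simp
  have hs2 : ((insert rc V : Finset (Int × Int)) : Set (Int × Int)) \ ({rc} : Set (Int × Int))
      = (V : Set (Int × Int)) := by
    ext z
    simp only [Finset.coe_insert, Set.mem_diff, Set.mem_insert_iff, Finset.mem_coe,
      Set.mem_singleton_iff]
    constructor
    · rintro ⟨hz | hz, hz2⟩
      · exact absurd hz hz2
      · exact hz
    · intro hz
      exact ⟨Or.inr hz, fun h => hrc (h ▸ hz)⟩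
  rw [hs1, hs2] at hbfs
  have hrcR : rc ∈ pvR grid rows cols (V : Set (Int × Int)) {rc} :=
    RSet_seed rfl hg (by simpa using hrc)
  have hp1 : (bfsLoop grid rows cols [rc] (insert rc V)).1
      = (dfsGo grid rows cols (rows * cols + 1) rc V).1 := by
    rw [hbfs.1, hdfs.1]
  have hp2 : (bfsLoop grid rows cols [rc] (insert rc V)).2
      = (dfsGo grid rows cols (rows * cols + 1) rc V).2 := by
    apply Finset.coe_injective
    rw [hbfs.2, hdfs.2]
    ext z
    simp only [Finset.coe_insert, Set.mem_union, Set.mem_insert_iff, Finset.mem_coe]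
    constructor
    · rintro ((rfl | hz) | hz)
      · exact Or.inr hrcR
      · exact Or.inl hz
      · exact Or.inr hz
    · rintro (hz | hz)
      · exact Or.inl (Or.inr hz)
      · exact Or.inr hz
  exact Prod.ext hp1 hp2

theorem min_island_eq_alt (grid : List (List String)) : min_island grid = min_island_alt grid := by
  by_cases hg0 : grid = []
  · simp [min_island, min_island_alt, hg0]
  · have hfold :
        List.foldl (fun (st : Option Int × Finset (Int × Int)) rc =>
            if pvVal grid rc.1 rc.2 = "1" ∧ rc ∉ st.2 then
              (some (match st.1 with
                | none => (bfsLoop grid grid.length (grid.getD 0 []).length [rc] (insert rc st.2)).1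
                | some m => min m (bfsLoop grid grid.length (grid.getD 0 []).length [rc] (insert rc st.2)).1),
               (bfsLoop grid grid.length (grid.getD 0 []).length [rc] (insert rc st.2)).2)
            else st)
          (none, ∅)
          ((List.range grid.length).flatMap
            (fun r => (List.range (grid.getD 0 []).length).map (fun c => ((r : Int), (c : Int)))))
      = List.foldl (fun (st : Option Int × Finset (Int × Int)) rc =>
            if pvVal grid rc.1 rc.2 = "1" ∧ rc ∉ st.2 then
              (some (match st.1 with
                | none => (dfsGo grid grid.length (grid.getD 0 []).length
                    (grid.length * (grid.getD 0 []).length + 1) rc st.2).1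
                | some m => min m (dfsGo grid grid.length (grid.getD 0 []).length
                    (grid.length * (grid.getD 0 []).length + 1) rc st.2).1),
               (dfsGo grid grid.length (grid.getD 0 []).length
                  (grid.length * (grid.getD 0 []).length + 1) rc st.2).2)
            else st)
          (none, ∅)
          ((List.range grid.length).flatMap
            (fun r => (List.range (grid.getD 0 []).length).map (fun c => ((r : Int), (c : Int))))) := by
      apply List.foldl_ext
      intro st rc hrcmem
      simp at hrcmem
      obtain ⟨r, hr, c, hc, rfl⟩ := hrcmem
      by_cases hcond : pvVal grid ((r : Int), (c : Int)).1 ((r : Int), (c : Int)).2 = "1"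
          ∧ ((r : Int), (c : Int)) ∉ st.2
      · rw [if_pos hcond, if_pos hcond]
        have hgood : pvGood grid grid.length (grid.getD 0 []).length ((r : Int), (c : Int)) := by
          refine ⟨?_, ?_, ?_, ?_, hcond.1⟩ <;> simp <;> omega
        rw [fill_agree grid grid.length (grid.getD 0 []).length ((r : Int), (c : Int)) st.2
          hgood hcond.2]
      · rw [if_neg hcond, if_neg hcond]
    simp only [min_island, min_island_alt, if_neg hg0]
    rw [hfold]


-- ===== VERDICT (by name: the statement is the Claim_ definition above) =====
theorem min_island_spec : Claim_equal_min_island := by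
  intro grid _ _
  unfold Spec_min_island
  exact min_island_eq_alt grid
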